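-- pv_equiv track=rewrite | github.com/BartvHerk/EyeTrackingPinball | source/field_conditions.py | extract_condition_windows
-- ===== SOURCE A (Python) =====
-- def extract_condition_windows(tracking_data, max_gap=60):
--     from collections import defaultdict
--
--     condition_settings = {
--         'condition_default': {'max_gap': 60, 'min_duration': 0},
--         'condition_multiball': {'max_gap': 100, 'min_duration': 300},
--     }
--
--     # Get all frame indices sorted
--     all_frames = sorted(tracking_data.keys())
--     condition_frames = {
--         'condition_default': set(),
--         'condition_multiball': set(),
--     }
--
--     # Determine which frames qualify for each condition
--     for frame in all_frames:
--         detections = tracking_data.get(frame, [])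
--         count = len(detections)
--         if count >= 1:
--             condition_frames['condition_default'].add(frame)
--         if count >= 2:
--             condition_frames['condition_multiball'].add(frame)
--
--     # Build windows with condition-specific settings
--     def build_windows(frames_set, max_gap, min_duration):
--         sorted_frames = sorted(frames_set)
--         windows = []
--         if not sorted_frames:
--             return windows
--
--         start = sorted_frames[0]
--         prev = start
--
--         for f in sorted_frames[1:]:
--             if f - prev > max_gap:
--                 if prev - start + 1 >= min_duration:
--                     windows.append((start, prev))
--                 start = f
--             prev = f
--
--         if prev - start + 1 >= min_duration:
--             windows.append((start, prev))
--
--         return windows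
--
--     condition_windows = {}
--     for cond, frames in condition_frames.items():
--         settings = condition_settings.get(cond, {})
--         max_gap = settings.get('max_gap', 60)
--         min_duration = settings.get('min_duration', 0)
--         condition_windows[cond] = build_windows(frames, max_gap, min_duration)
--
--     return condition_windows
-- ===== SOURCE B (Python) =====
-- def extract_condition_windows(tracking_data, max_gap=60):
--     # Boundary-detection formulation: a frame starts a window iff its predecessor
--     # is absent or more than gap away; it ends one iff its successor is absent or
--     # more than gap away; the k-th start pairs with the k-th end positionally.
--     def windows(frames, gap, min_dur):
--         starts = [f for f, p in zip(frames, [None] + frames) if p is None or f - p > gap]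
--         ends = [f for f, n in zip(frames, frames[1:] + [None]) if n is None or n - f > gap]
--         return [(s, e) for s, e in zip(starts, ends) if e - s + 1 >= min_dur]
--
--     keys = sorted(tracking_data)
--     return {
--         'condition_default': windows([f for f in keys if len(tracking_data[f]) >= 1], 60, 0),
--         'condition_multiball': windows([f for f in keys if len(tracking_data[f]) >= 2], 100, 300),
--     }
-- ===== Notes on version B (the rewrite author's own statement) =====
-- stated objective: alternative
-- what changed: B replaces A's single-pass (windows,start,prev) state machine with boundary detection: window starts and ends are computed independently by comparing each qualifying frame with its shifted neighbour list (zip with predecessor / successor), paired positionally, and filtered by span; frame classification becomes two filters over the sorted keys instead of a loop adding into sets.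
import Mathlib
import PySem

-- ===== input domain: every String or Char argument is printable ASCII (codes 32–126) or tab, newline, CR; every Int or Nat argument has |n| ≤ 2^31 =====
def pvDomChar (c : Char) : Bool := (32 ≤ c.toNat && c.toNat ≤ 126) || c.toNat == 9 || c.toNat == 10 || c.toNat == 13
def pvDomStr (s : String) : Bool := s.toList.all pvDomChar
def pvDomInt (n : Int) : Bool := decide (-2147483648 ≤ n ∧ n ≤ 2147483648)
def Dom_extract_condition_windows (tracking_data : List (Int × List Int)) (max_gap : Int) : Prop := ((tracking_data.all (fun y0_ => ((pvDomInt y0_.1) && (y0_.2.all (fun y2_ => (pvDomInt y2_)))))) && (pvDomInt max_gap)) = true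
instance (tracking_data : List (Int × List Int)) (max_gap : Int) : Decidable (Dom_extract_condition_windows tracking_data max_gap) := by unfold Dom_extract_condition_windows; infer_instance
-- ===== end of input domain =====

-- B replaces A's inline start/prev window state machine by boundary detection: window starts
-- and ends are found independently by comparing each frame with its neighbour (zip with the
-- shifted list) and paired positionally (objective: alternative algorithm; same cost).
-- The tracking_data dict is given as an association list: lookup = first match, keys = first occurrences.

-- ===== PORT A =====
-- shared input-decoding primitive: tracking_data lookup on the association list (first match)
def pvGet (td : List (Int × List Int)) (k : Int) : List Int :=
  match td with
  | [] => []
  | (a, v) :: rest => if a == k then v else pvGet rest k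

-- the body of A's classification loop over all_frames (condition_frames as PySem.Sets)
def pvClassA (td : List (Int × List Int)) (st : PySem.Set Int × PySem.Set Int) (frame : Int) :
    PySem.Set Int × PySem.Set Int :=
  let count := (pvGet td frame).length
  let st1 := if count ≥ 1 then (PySem.Set.add st.1 frame, st.2) else st
  if count ≥ 2 then (st1.1, PySem.Set.add st1.2 frame) else st1

-- the body of A's build_windows loop: state (windows, start, prev)
def pvStepA (gap md : Int) (acc : List (Int × Int) × Int × Int) (f : Int) :
    List (Int × Int) × Int × Int :=
  if f - acc.2.2 > gap then
    (if acc.2.2 - acc.2.1 + 1 ≥ md then acc.1 ++ [(acc.2.1, acc.2.2)] else acc.1, f, f)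
  else (acc.1, acc.2.1, f)

-- A's build_windows(frames_set, max_gap, min_duration)
def pvBuildWindowsA (frames_set : PySem.Set Int) (gap md : Int) : List (Int × Int) :=
  match PySem.List.sorted frames_set (fun x => x) false with
  | [] => []
  | s0 :: rest =>
    let r := rest.foldl (pvStepA gap md) ([], s0, s0)
    if r.2.2 - r.2.1 + 1 ≥ md then r.1 ++ [(r.2.1, r.2.2)] else r.1

def extract_condition_windows (tracking_data : List (Int × List Int)) (max_gap : Int) :
    List (String × List (Int × Int)) :=
  let all_frames := PySem.List.sorted (PySem.List.dedup (tracking_data.map Prod.fst)) (fun x => x) false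
  let cf := all_frames.foldl (pvClassA tracking_data) (PySem.Set.empty, PySem.Set.empty)
  -- the final loop over condition_frames.items() with the literal settings dict inlined
  [("condition_default", pvBuildWindowsA cf.1 60 0),
   ("condition_multiball", pvBuildWindowsA cf.2 100 300)]

-- ===== PORT B =====
-- starts = [f for f, p in zip(frames, [None] + frames) if p is None or f - p > gap]
def pvStartsB (frames : List Int) (gap : Int) : List Int :=
  ((frames.zip ((none : Option Int) :: frames.map some)).filter
    (fun fp => match fp.2 with | none => true | some p => decide (fp.1 - p > gap))).map Prod.fst

-- ends = [f for f, n in zip(frames, frames[1:] + [None]) if n is None or n - f > gap]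
def pvEndsB (frames : List Int) (gap : Int) : List Int :=
  ((frames.zip ((frames.map some).drop 1 ++ [(none : Option Int)])).filter
    (fun fn => match fn.2 with | none => true | some n => decide (n - fn.1 > gap))).map Prod.fst

-- [(s, e) for s, e in zip(starts, ends) if e - s + 1 >= min_dur]
def pvWindowsB (frames : List Int) (gap md : Int) : List (Int × Int) :=
  ((pvStartsB frames gap).zip (pvEndsB frames gap)).filter (fun se => decide (se.2 - se.1 + 1 ≥ md))

def extract_condition_windows_alt (tracking_data : List (Int × List Int)) (max_gap : Int) :
    List (String × List (Int × Int)) :=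
  let keys := PySem.List.sorted (PySem.List.dedup (tracking_data.map Prod.fst)) (fun x => x) false
  [("condition_default", pvWindowsB (keys.filter (fun f => (pvGet tracking_data f).length ≥ 1)) 60 0),
   ("condition_multiball", pvWindowsB (keys.filter (fun f => (pvGet tracking_data f).length ≥ 2)) 100 300)]

-- ===== PRECONDITION & SPEC =====
def Spec_extract_condition_windows (tracking_data : List (Int × List Int)) (max_gap : Int) (out : List (String × List (Int × Int))) : Prop := out = extract_condition_windows_alt tracking_data max_gap
instance (tracking_data : List (Int × List Int)) (max_gap : Int) (out : List (String × List (Int × Int))) : Decidable (Spec_extract_condition_windows tracking_data max_gap out) := by unfold Spec_extract_condition_windows; infer_instance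

-- ===== CLAIM (what is proved, stated in full; the proofs are below) =====
def Claim_equal_extract_condition_windows : Prop := ∀ (tracking_data : List (Int × List Int)) (max_gap : Int), Dom_extract_condition_windows tracking_data max_gap → Spec_extract_condition_windows tracking_data max_gap (extract_condition_windows tracking_data max_gap)

-- ===== LEMMAS AND PROOFS =====

theorem pv_set_add_append {s : List Int} {x : Int} (h : x ∉ s) :
    PySem.Set.add s x = s ++ [x] := by
  simp [PySem.Set.add, PySem.Set.contains, h]

-- the classification fold builds the two filtered lists (appended to the accumulated sets)
theorem pv_fold_sets (td : List (Int × List Int)) :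
    ∀ (l : List Int), l.Nodup →
    ∀ (s1 s2 : List Int), (∀ x ∈ l, x ∉ s1) → (∀ x ∈ l, x ∉ s2) →
    l.foldl (pvClassA td) (s1, s2)
      = (s1 ++ l.filter (fun f => (pvGet td f).length ≥ 1),
         s2 ++ l.filter (fun f => (pvGet td f).length ≥ 2)) := by
  intro l
  induction l with
  | nil => intro _ s1 s2 _ _; simp
  | cons x l ih =>
    intro hnd s1 s2 h1 h2
    have hx1 : x ∉ s1 := h1 x (List.mem_cons_self ..)
    have hx2 : x ∉ s2 := h2 x (List.mem_cons_self ..)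
    have hnd' := (List.nodup_cons.mp hnd)
    have step : pvClassA td (s1, s2) x
        = ((if (pvGet td x).length ≥ 1 then s1 ++ [x] else s1),
           (if (pvGet td x).length ≥ 2 then s2 ++ [x] else s2)) := by
      unfold pvClassA
      by_cases h2c : (pvGet td x).length ≥ 2
      · have h1c : (pvGet td x).length ≥ 1 := by omega
        simp [h1c, h2c, pv_set_add_append hx1, pv_set_add_append hx2]
      · by_cases h1c : (pvGet td x).length ≥ 1
        · simp [h1c, h2c, pv_set_add_append hx1]
        · simp [h1c, h2c]
    have key : ∀ (p : Int → Prop) [DecidablePred p] (s : List Int),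
        (if p x then s ++ [x] else s) ++ l.filter (fun f => decide (p f))
          = s ++ (x :: l).filter (fun f => decide (p f)) := by
      intro p _ s
      by_cases hp : p x <;> simp [hp]
    simp only [List.foldl_cons, step]
    rw [ih hnd'.2
      (if (pvGet td x).length ≥ 1 then s1 ++ [x] else s1)
      (if (pvGet td x).length ≥ 2 then s2 ++ [x] else s2)
      ?_ ?_]
    · exact Prod.ext
        (key (fun f => (pvGet td f).length ≥ 1) s1)
        (key (fun f => (pvGet td f).length ≥ 2) s2)
    · intro y hy
      have : y ≠ x := fun h => hnd'.1 (h ▸ hy)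
      by_cases hp : (pvGet td x).length ≥ 1 <;>
        simp [hp, h1 y (List.mem_cons_of_mem _ hy), this]
    · intro y hy
      have : y ≠ x := fun h => hnd'.1 (h ▸ hy)
      by_cases hp : (pvGet td x).length ≥ 2 <;>
        simp [hp, h2 y (List.mem_cons_of_mem _ hy), this]

-- recursive characterizations of B's starts/ends lists (proof-only helpers)
def pvSTail (gap : Int) : List Int → Int → List Int
  | [], _ => []
  | f :: t, p => (if f - p > gap then [f] else []) ++ pvSTail gap t f

def pvEOf (gap : Int) (p : Int) : List Int → List Int
  | [] => [p]
  | f :: t => (if f - p > gap then [p] else []) ++ pvEOf gap f t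

theorem pv_sTail_eq (gap : Int) :
    ∀ (t : List Int) (p : Int),
    ((t.zip (some p :: t.map some)).filter
      (fun fp => match fp.2 with | none => true | some q => decide (fp.1 - q > gap))).map Prod.fst
      = pvSTail gap t p := by
  intro t
  induction t with
  | nil => intro p; simp [pvSTail]
  | cons f t ih =>
    intro p
    simp only [List.zip_cons_cons, List.filter_cons, pvSTail]
    by_cases h : f - p > gap <;> simp [h, ih f]

theorem pv_starts_cons (gap : Int) (x : Int) (t : List Int) :
    pvStartsB (x :: t) gap = x :: pvSTail gap t x := by
  unfold pvStartsB
  simp only [List.map_cons, List.zip_cons_cons, List.filter_cons]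
  simp [pv_sTail_eq gap t x]

theorem pv_ends_eq (gap : Int) :
    ∀ (t : List Int) (p : Int),
    (((p :: t).zip ((t.map some) ++ [(none : Option Int)])).filter
      (fun fn => match fn.2 with | none => true | some n => decide (n - fn.1 > gap))).map Prod.fst
      = pvEOf gap p t := by
  intro t
  induction t with
  | nil => intro p; simp [pvEOf]
  | cons f t ih =>
    intro p
    simp only [List.map_cons, List.cons_append, List.zip_cons_cons, List.filter_cons, pvEOf]
    by_cases h : f - p > gap <;> simp [h, ih f]

theorem pv_ends_cons (gap : Int) (x : Int) (t : List Int) :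
    pvEndsB (x :: t) gap = pvEOf gap x t := by
  unfold pvEndsB
  have : ((x :: t).map some).drop 1 = t.map some := by simp
  rw [this]
  exact pv_ends_eq gap t x

-- A's window loop equals B's paired-boundaries pipeline
theorem pv_loop_eq (gap md : Int) :
    ∀ (rest : List Int) (ws : List (Int × Int)) (s p : Int),
    (let r := rest.foldl (pvStepA gap md) (ws, s, p);
     if r.2.2 - r.2.1 + 1 ≥ md then r.1 ++ [(r.2.1, r.2.2)] else r.1)
    = ws ++ ((s :: pvSTail gap rest p).zip (pvEOf gap p rest)).filter
        (fun se => decide (se.2 - se.1 + 1 ≥ md)) := by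
  intro rest
  induction rest with
  | nil =>
    intro ws s p
    simp only [List.foldl_nil, pvSTail, pvEOf, List.zip_cons_cons, List.zip_nil_right,
      List.filter_cons, List.filter_nil]
    by_cases h : p - s + 1 ≥ md <;> simp [h]
  | cons f t ih =>
    intro ws s p
    simp only [List.foldl_cons, pvSTail, pvEOf]
    by_cases hg : f - p > gap
    · have hA : pvStepA gap md (ws, s, p) f
          = ((if p - s + 1 ≥ md then ws ++ [(s, p)] else ws), f, f) := by
        unfold pvStepA; simp [hg]
      rw [hA, ih]
      simp only [hg, if_true]
      by_cases h : p - s + 1 ≥ md <;> simp [h]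
    · have hA : pvStepA gap md (ws, s, p) f = (ws, s, f) := by
        unfold pvStepA; simp [hg]
      rw [hA, ih]
      simp [hg]

-- build_windows on an already-sorted list equals B's windows on the same list
theorem pv_buildA_eq_windowsB (l : List Int) (gap md : Int)
    (hl : PySem.List.sorted l (fun x => x) false = l) :
    pvBuildWindowsA l gap md = pvWindowsB l gap md := by
  unfold pvBuildWindowsA pvWindowsB
  rw [hl]
  cases l with
  | nil => simp [pvStartsB, pvEndsB]
  | cons s0 rest =>
    rw [pv_starts_cons, pv_ends_cons]
    exact pv_loop_eq gap md rest [] s0 s0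

-- ===== VERDICT (by name: the statement is the Claim_ definition above) =====
theorem extract_condition_windows_spec : Claim_equal_extract_condition_windows := by
  intro td mg _
  unfold Spec_extract_condition_windows extract_condition_windows extract_condition_windows_alt
  have hpl : (PySem.List.sorted (PySem.List.dedup (td.map Prod.fst)) (fun x => x) false).Pairwise
      (· < ·) := by
    rw [PySem.List.dedup_eq_ofList]
    exact PySem.List.sorted_ofList_pairwise_lt _
  set af := PySem.List.sorted (PySem.List.dedup (td.map Prod.fst)) (fun x => x) false with haf
  have hnd : af.Nodup := hpl.imp (fun h => ne_of_lt h)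
  have hcf := pv_fold_sets td af hnd [] [] (by simp) (by simp)
  have hsorted : ∀ (p : Int → Bool),
      PySem.List.sorted (af.filter p) (fun x => x) false = af.filter p := by
    intro p
    exact PySem.List.sorted_eq_self_of_pairwise _ _
      ((hpl.filter p).imp (fun h => le_of_lt h))
  simp only [PySem.Set.empty, List.nil_append] at hcf ⊢
  rw [hcf]
  rw [pv_buildA_eq_windowsB _ _ _ (hsorted _), pv_buildA_eq_windowsB _ _ _ (hsorted _)]
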